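-- pv_equiv track=rewrite | github.com/ArtemPl-lab/game_py | generate_map.py | generate_mass
-- ===== SOURCE A (Python) =====
-- def generate_mass(h,w):
--     map = [[0 for j in range(w)] for i in range(h)]
--     for i in range(h):
--         for j in range(w):
--             if (i%2!=0 and j%2 != 0) and (i<h-1 and j<w-1):
--                 map[i][j] = 1
--             else:
--                 map[i][j] = 0
--     return map
-- ===== SOURCE B (Python) =====
-- def generate_mass(h, w):
--     grid = [[0] * w for _ in range(h)]
--     for i in range(1, h - 1, 2):
--         for j in range(1, w - 1, 2):
--             grid[i][j] = 1
--     return grid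
-- ===== Notes on version B (the rewrite author's own statement) =====
-- stated objective: faster
-- what changed: Instead of visiting every cell and branching per cell, B builds the all-zero grid once and runs a sparse strided double loop over only the interior odd,odd positions, writing the 1s directly.
import Mathlib
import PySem

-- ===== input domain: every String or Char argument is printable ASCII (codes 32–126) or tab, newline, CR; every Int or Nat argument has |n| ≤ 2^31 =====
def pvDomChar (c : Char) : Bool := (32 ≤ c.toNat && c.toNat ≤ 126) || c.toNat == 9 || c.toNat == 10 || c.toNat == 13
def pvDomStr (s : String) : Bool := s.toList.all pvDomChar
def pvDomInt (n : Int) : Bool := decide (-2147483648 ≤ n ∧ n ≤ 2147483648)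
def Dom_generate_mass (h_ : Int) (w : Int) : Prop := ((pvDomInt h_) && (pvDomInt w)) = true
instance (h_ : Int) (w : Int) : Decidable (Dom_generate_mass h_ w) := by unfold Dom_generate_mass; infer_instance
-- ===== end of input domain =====

-- B replaces A's per-cell branch over every cell by a zero grid plus a sparse strided loop that
-- writes only the interior odd,odd 1-cells.

-- ===== PORT A =====
-- map[i][j] = v with i from range(h), j from range(w): the indices are nonnegative and in range,
-- so the assignment is exactly List.set i.toNat (row.set j.toNat v) on the current row.
def generate_mass (h_ : Int) (w : Int) : List (List Int) :=
  let m0 : List (List Int) :=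
    (PySem.List.pyRange 0 h_ 1).map (fun _ => (PySem.List.pyRange 0 w 1).map (fun _ => (0 : Int)))
  (PySem.List.pyRange 0 h_ 1).foldl (fun m i =>
    (PySem.List.pyRange 0 w 1).foldl (fun m j =>
      if (PySem.Int.mod i 2 ≠ 0 ∧ PySem.Int.mod j 2 ≠ 0) ∧ (i < h_ - 1 ∧ j < w - 1) then
        m.set i.toNat ((m.getD i.toNat []).set j.toNat 1)
      else
        m.set i.toNat ((m.getD i.toNat []).set j.toNat 0)) m) m0

-- ===== PORT B =====
-- [0] * w is List.replicate w.toNat 0 (empty for w ≤ 0, exactly as in Python); grid[i][j] = 1 ported as in A.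
def generate_mass_alt (h_ : Int) (w : Int) : List (List Int) :=
  let g0 : List (List Int) :=
    (PySem.List.pyRange 0 h_ 1).map (fun _ => List.replicate w.toNat (0 : Int))
  (PySem.List.pyRange 1 (h_ - 1) 2).foldl (fun g i =>
    (PySem.List.pyRange 1 (w - 1) 2).foldl (fun g j =>
      g.set i.toNat ((g.getD i.toNat []).set j.toNat 1)) g) g0

-- ===== PRECONDITION & SPEC =====
def Spec_generate_mass (h_ : Int) (w : Int) (out : List (List Int)) : Prop := out = generate_mass_alt h_ w
instance (h_ : Int) (w : Int) (out : List (List Int)) : Decidable (Spec_generate_mass h_ w out) := by unfold Spec_generate_mass; infer_instance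

-- ===== CLAIM (what is proved, stated in full; the proofs are below) =====
def Claim_equal_generate_mass : Prop := ∀ (h_ : Int) (w : Int), Dom_generate_mass h_ w → Spec_generate_mass h_ w (generate_mass h_ w)

-- ===== LEMMAS AND PROOFS =====

theorem pv_rowfold_getElem? {α : Type} (val : Int → α) (js : List Int)
    (hpos : ∀ j ∈ js, 0 ≤ j) (r : List α) (k : Nat) :
    (js.foldl (fun r j => r.set j.toNat (val j)) r)[k]?
      = if (k : Int) ∈ js ∧ k < r.length then some (val (k : Int)) else r[k]? := by
  induction js generalizing r with
  | nil => simp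
  | cons j js ih =>
    have hj : 0 ≤ j := hpos j (by simp)
    rw [List.foldl_cons, ih (fun x hx => hpos x (by simp [hx])), List.length_set,
      List.getElem?_set]
    by_cases hk : k < r.length
    · by_cases hkj : j.toNat = k
      · have hkj' : (k : Int) = j := by omega
        rw [if_pos (show (k : Int) ∈ j :: js ∧ k < r.length from
          ⟨List.mem_cons.mpr (Or.inl hkj'), hk⟩)]
        by_cases hmem : (k : Int) ∈ js
        · rw [if_pos (show (k : Int) ∈ js ∧ k < r.length from ⟨hmem, hk⟩)]
        · rw [if_neg (show ¬((k : Int) ∈ js ∧ k < r.length) by tauto), if_pos hkj,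
            if_pos (show j.toNat < r.length by omega), hkj']
      · have hkj' : ¬ (k : Int) = j := by omega
        by_cases hmem : (k : Int) ∈ js
        · rw [if_pos (show (k : Int) ∈ js ∧ k < r.length from ⟨hmem, hk⟩),
            if_pos (show (k : Int) ∈ j :: js ∧ k < r.length from
              ⟨List.mem_cons.mpr (Or.inr hmem), hk⟩)]
        · rw [if_neg (show ¬((k : Int) ∈ js ∧ k < r.length) by tauto), if_neg hkj,
            if_neg (show ¬((k : Int) ∈ j :: js ∧ k < r.length) by
              rw [List.mem_cons]; tauto)]
    · have hrk : r[k]? = none := List.getElem?_eq_none (by omega)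
      rw [if_neg (show ¬((k : Int) ∈ js ∧ k < r.length) by tauto),
        if_neg (show ¬((k : Int) ∈ j :: js ∧ k < r.length) by tauto)]
      by_cases hkj : j.toNat = k
      · rw [if_pos hkj, if_neg (show ¬ j.toNat < r.length by omega), hrk]
      · rw [if_neg hkj]

theorem pv_set_getD_self {α : Type} (g : List α) (i : Nat) (d : α) :
    g.set i (g.getD i d) = g := by
  rcases lt_or_ge i g.length with hlt | hge
  · rw [List.getD_eq_getElem g d hlt]
    exact List.set_getElem_self hlt
  · exact List.set_eq_of_length_le hge

theorem pv_inner_to_row {α : Type} (val : Int → α) (js : List Int) (i : Nat)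
    (g : List (List α)) :
    (js.foldl (fun g j => g.set i ((g.getD i []).set j.toNat (val j))) g)
      = g.set i (js.foldl (fun r j => r.set j.toNat (val j)) (g.getD i [])) := by
  induction js generalizing g with
  | nil => exact (pv_set_getD_self g i []).symm
  | cons j js ih =>
    rw [List.foldl_cons, List.foldl_cons]
    rcases lt_or_ge i g.length with hlt | hge
    · rw [ih]
      have h1 : (g.set i ((g.getD i []).set j.toNat (val j))).getD i []
          = (g.getD i []).set j.toNat (val j) := by
        rw [List.getD_eq_getElem?_getD, List.getElem?_set_self (by simpa using hlt)]
        rfl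
      rw [h1, List.set_set]
    · have hset : ∀ x : List α, g.set i x = g := fun x => List.set_eq_of_length_le hge
      simp only [hset]
      rw [ih]
      simp only [hset]

theorem pv_gridfold_getElem? {α : Type} (rowFn : List α → Int → List α) (is : List Int)
    (hnd : is.Nodup) (hpos : ∀ i ∈ is, 0 ≤ i) (g : List (List α)) (k : Nat) :
    (is.foldl (fun g i => g.set i.toNat (rowFn (g.getD i.toNat []) i)) g)[k]?
      = if (k : Int) ∈ is ∧ k < g.length then some (rowFn (g.getD k []) (k : Int))
        else g[k]? := by
  induction is generalizing g with
  | nil => simp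
  | cons i is ih =>
    have hi : 0 ≤ i := hpos i (by simp)
    have hnotin : i ∉ is := (List.nodup_cons.mp hnd).1
    rw [List.foldl_cons,
      ih (List.nodup_cons.mp hnd).2 (fun x hx => hpos x (by simp [hx])), List.length_set]
    by_cases hk : k < g.length
    · by_cases hki : i.toNat = k
      · have hki' : (k : Int) = i := by omega
        have hmem : (k : Int) ∉ is := fun h => hnotin (hki' ▸ h)
        rw [if_neg (show ¬((k : Int) ∈ is ∧ k < g.length) by tauto),
          if_pos (show (k : Int) ∈ i :: is ∧ k < g.length from
            ⟨List.mem_cons.mpr (Or.inl hki'), hk⟩)]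
        subst hki
        rw [List.getElem?_set_self (by omega), hki']
      · have hki' : ¬ (k : Int) = i := by omega
        have hgd : (g.set i.toNat (rowFn (g.getD i.toNat []) i)).getD k []
            = g.getD k [] := by
          rw [List.getD_eq_getElem?_getD, List.getElem?_set_ne hki,
            List.getD_eq_getElem?_getD]
        by_cases hmem : (k : Int) ∈ is
        · rw [if_pos (show (k : Int) ∈ is ∧ k < g.length from ⟨hmem, hk⟩), hgd,
            if_pos (show (k : Int) ∈ i :: is ∧ k < g.length from
              ⟨List.mem_cons.mpr (Or.inr hmem), hk⟩)]
        · rw [if_neg (show ¬((k : Int) ∈ is ∧ k < g.length) by tauto),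
            if_neg (show ¬((k : Int) ∈ i :: is ∧ k < g.length) by
              rw [List.mem_cons]; tauto),
            List.getElem?_set_ne hki]
    · rw [if_neg (show ¬((k : Int) ∈ is ∧ k < g.length) by tauto),
        if_neg (show ¬((k : Int) ∈ i :: is ∧ k < g.length) by tauto)]
      by_cases hki : i.toNat = k
      · rw [List.getElem?_set, if_pos hki, if_neg (by omega),
          (List.getElem?_eq_none (by omega : g.length ≤ k)).symm]
      · rw [List.getElem?_set_ne hki]

def pv_valA (h_ w i j : Int) : Int :=
  if (PySem.Int.mod i 2 ≠ 0 ∧ PySem.Int.mod j 2 ≠ 0) ∧ (i < h_ - 1 ∧ j < w - 1) then 1 else 0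

theorem pv_nodup_pyRange_two (a b : Int) : (PySem.List.pyRange a b 2).Nodup := by
  rw [PySem.List.pyRange_of_pos a b (by norm_num)]
  exact List.Nodup.map (fun x y hxy => by omega) (List.nodup_range)

theorem pv_pos_pyRange_two (b : Int) : ∀ j ∈ PySem.List.pyRange 1 b 2, 0 ≤ j := by
  intro j hj
  have := (PySem.List.mem_pyRange_iff_of_pos (by norm_num : (0:Int) < 2) j).mp hj
  omega

theorem pv_main (h_ w : Int) : generate_mass h_ w = generate_mass_alt h_ w := by
  unfold generate_mass generate_mass_alt
  simp only [List.map_const', PySem.List.length_pyRange_one, Int.sub_zero]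
  have hA1 : ∀ i : Int, (fun (m : List (List Int)) (j : Int) =>
      if (PySem.Int.mod i 2 ≠ 0 ∧ PySem.Int.mod j 2 ≠ 0) ∧ (i < h_ - 1 ∧ j < w - 1) then
        m.set i.toNat ((m.getD i.toNat []).set j.toNat 1)
      else m.set i.toNat ((m.getD i.toNat []).set j.toNat 0))
      = fun m j => m.set i.toNat ((m.getD i.toNat []).set j.toNat (pv_valA h_ w i j)) := by
    intro i; funext m j
    unfold pv_valA
    by_cases hc : (PySem.Int.mod i 2 ≠ 0 ∧ PySem.Int.mod j 2 ≠ 0) ∧ (i < h_ - 1 ∧ j < w - 1)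
    · rw [if_pos hc, if_pos hc]
    · rw [if_neg hc, if_neg hc]
  simp only [hA1]
  have hA2 : ∀ (m : List (List Int)) (i : Int),
      (PySem.List.pyRange 0 w 1).foldl
        (fun m j => m.set i.toNat ((m.getD i.toNat []).set j.toNat (pv_valA h_ w i j))) m
      = m.set i.toNat ((PySem.List.pyRange 0 w 1).foldl
          (fun r j => r.set j.toNat (pv_valA h_ w i j)) (m.getD i.toNat [])) :=
    fun m i => pv_inner_to_row (pv_valA h_ w i) _ _ _
  have hB2 : ∀ (g : List (List Int)) (i : Int),
      (PySem.List.pyRange 1 (w - 1) 2).foldl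
        (fun g j => g.set i.toNat ((g.getD i.toNat []).set j.toNat 1)) g
      = g.set i.toNat ((PySem.List.pyRange 1 (w - 1) 2).foldl
          (fun r j => r.set j.toNat (1 : Int)) (g.getD i.toNat [])) :=
    fun g i => pv_inner_to_row (fun _ => (1 : Int)) _ _ _
  simp only [hA2, hB2]
  apply List.ext_getElem?
  intro k
  rw [pv_gridfold_getElem?
        (fun r i => (PySem.List.pyRange 0 w 1).foldl (fun r j => r.set j.toNat (pv_valA h_ w i j)) r)
        _ (PySem.List.nodup_pyRange_one 0 h_) (fun i hi => by
          have := (PySem.List.mem_pyRange_one).mp hi; omega) _ k,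
      pv_gridfold_getElem?
        (fun r _ => (PySem.List.pyRange 1 (w - 1) 2).foldl (fun r j => r.set j.toNat (1 : Int)) r)
        _ (pv_nodup_pyRange_two 1 (h_ - 1)) (pv_pos_pyRange_two (h_ - 1)) _ k
      ]
  simp only [List.length_replicate]
  by_cases hk : k < h_.toNat
  · have hrepl : (List.replicate h_.toNat (List.replicate w.toNat (0:Int))).getD k []
        = List.replicate w.toNat (0:Int) := by
      rw [List.getD_eq_getElem?_getD, List.getElem?_replicate, if_pos hk]; rfl
    have hmemA : (k : Int) ∈ PySem.List.pyRange 0 h_ 1 := by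
      rw [PySem.List.mem_pyRange_one]; omega
    rw [if_pos ⟨hmemA, hk⟩, hrepl]
    have hg0k : (List.replicate h_.toNat (List.replicate w.toNat (0:Int)))[k]?
        = some (List.replicate w.toNat (0:Int)) := by
      rw [List.getElem?_replicate, if_pos hk]
    by_cases hmemB : (k : Int) ∈ PySem.List.pyRange 1 (h_ - 1) 2
    · rw [if_pos ⟨hmemB, hk⟩]
      have hkfacts := (PySem.List.mem_pyRange_iff_of_pos (by norm_num : (0:Int) < 2) (k : Int)).mp hmemB
      congr 1
      apply List.ext_getElem?
      intro l
      rw [pv_rowfold_getElem? _ _ (fun j hj => by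
            have := (PySem.List.mem_pyRange_one).mp hj; omega) _ l,
        pv_rowfold_getElem? _ _ (pv_pos_pyRange_two (w - 1)) _ l]
      simp only [List.length_replicate]
      by_cases hl : l < w.toNat
      · have hmemlA : (l : Int) ∈ PySem.List.pyRange 0 w 1 := by
          rw [PySem.List.mem_pyRange_one]; omega
        rw [if_pos ⟨hmemlA, hl⟩]
        by_cases hmemlB : (l : Int) ∈ PySem.List.pyRange 1 (w - 1) 2
        · rw [if_pos ⟨hmemlB, hl⟩]
          have hlfacts := (PySem.List.mem_pyRange_iff_of_pos (by norm_num : (0:Int) < 2) (l : Int)).mp hmemlB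
          have : pv_valA h_ w (k : Int) (l : Int) = 1 := by
            unfold pv_valA
            rw [if_pos]
            simp only [PySem.Int.mod_eq_emod_of_pos (by norm_num : (0:Int) < 2)]
            exact ⟨⟨by omega, by omega⟩, by omega, by omega⟩
          rw [this]
        · rw [if_neg (by tauto), List.getElem?_replicate, if_pos hl]
          have hlfacts := fun hmem => hmemlB ((PySem.List.mem_pyRange_iff_of_pos (by norm_num : (0:Int) < 2) (l : Int)).mpr hmem)
          have : pv_valA h_ w (k : Int) (l : Int) = 0 := by
            unfold pv_valA
            rw [if_neg]
            intro hcond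
            apply hlfacts
            obtain ⟨⟨hc1, hc2⟩, hc3, hc4⟩ := hcond
            rw [PySem.Int.mod_eq_emod_of_pos (by norm_num)] at hc2
            refine ⟨by omega, by omega, by omega⟩
          rw [this]
      · rw [if_neg (by tauto), if_neg (by tauto)]
    · rw [if_neg (by tauto), hg0k]
      have hkneg := fun hmem => hmemB ((PySem.List.mem_pyRange_iff_of_pos (by norm_num : (0:Int) < 2) (k : Int)).mpr hmem)
      congr 1
      apply List.ext_getElem?
      intro l
      rw [pv_rowfold_getElem? _ _ (fun j hj => by
            have := (PySem.List.mem_pyRange_one).mp hj; omega) _ l]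
      simp only [List.length_replicate]
      by_cases hl : l < w.toNat
      · have hmemlA : (l : Int) ∈ PySem.List.pyRange 0 w 1 := by
          rw [PySem.List.mem_pyRange_one]; omega
        rw [if_pos ⟨hmemlA, hl⟩, List.getElem?_replicate, if_pos hl]
        have : pv_valA h_ w (k : Int) (l : Int) = 0 := by
          unfold pv_valA
          rw [if_neg]
          intro hcond
          apply hkneg
          obtain ⟨⟨hc1, hc2⟩, hc3, hc4⟩ := hcond
          rw [PySem.Int.mod_eq_emod_of_pos (by norm_num)] at hc1
          refine ⟨by omega, by omega, by omega⟩
        rw [this]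
      · rw [if_neg (by tauto)]
  · rw [if_neg (by tauto), if_neg (by tauto)]

-- ===== VERDICT (by name: the statement is the Claim_ definition above) =====
theorem generate_mass_spec : Claim_equal_generate_mass := by
  intro h_ w _
  unfold Spec_generate_mass
  exact pv_main h_ w
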